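-- pv_equiv track=rewrite | github.com/curiousTauseef/thesis-scripts | nkjp.py | extract_gnc
-- ===== SOURCE A (Python) =====
-- gender_tags = {'m1', 'm2', 'm3', 'f', 'n'}
--
-- number_tags = {'pl', 'sg'}
--
-- case_tags = {'nom', 'gen', 'dat', 'acc', 'inst', 'loc', 'voc'}
--
-- def extract_gnc(interpretation):
--     gender = next((token for token in interpretation if token in gender_tags), None)
--     number = next((token for token in interpretation if token in number_tags), None)
--     case = next((token for token in interpretation if token in case_tags), None)
--     pos = interpretation[1]
--     gnc = ''.join(list(filter(None, [gender, number, case])))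
--     if gnc:
--         return "{0}:{1}".format(pos, gnc)
--     return pos
-- ===== SOURCE B (Python) =====
-- _TAG2CAT = {'m1': 0, 'm2': 0, 'm3': 0, 'f': 0, 'n': 0,
--             'pl': 1, 'sg': 1,
--             'nom': 2, 'gen': 2, 'dat': 2, 'acc': 2, 'inst': 2, 'loc': 2, 'voc': 2}
--
-- def extract_gnc(interpretation):
--     # Walk the list BACKWARDS, classifying each token via one dict lookup and
--     # overwriting its category slot unconditionally: the last write in the
--     # reversed walk is exactly the first match in forward order.
--     slots = [None, None, None]
--     for token in reversed(interpretation):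
--         cat = _TAG2CAT.get(token)
--         if cat is not None:
--             slots[cat] = token
--     pos = interpretation[1]
--     gnc = ''.join(s for s in slots if s is not None)
--     return pos + ':' + gnc if gnc else pos
-- ===== Notes on version B (the rewrite author's own statement) =====
-- stated objective: alternative
-- what changed: Replaces A's three forward next(...) scans with one dict index mapping every tag to its category, a single BACKWARDS walk that classifies each token by one lookup and unconditionally overwrites its category slot (last write in reverse = first match forward), and plain concatenation instead of format().
import Mathlib
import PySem

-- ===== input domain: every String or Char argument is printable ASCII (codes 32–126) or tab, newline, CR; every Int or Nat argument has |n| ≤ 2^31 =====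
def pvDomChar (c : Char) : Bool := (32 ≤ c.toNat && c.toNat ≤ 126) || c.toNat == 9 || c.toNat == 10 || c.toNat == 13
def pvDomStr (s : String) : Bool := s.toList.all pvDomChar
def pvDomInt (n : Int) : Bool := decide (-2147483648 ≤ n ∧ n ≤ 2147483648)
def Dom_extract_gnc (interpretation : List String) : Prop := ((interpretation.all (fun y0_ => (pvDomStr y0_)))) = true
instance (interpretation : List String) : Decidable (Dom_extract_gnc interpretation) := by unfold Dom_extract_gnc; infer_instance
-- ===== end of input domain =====

-- B replaces A's three forward scans by one tag→category dict and a single backwards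
-- overwriting walk (last write in reverse = first match forward); same value everywhere A returns.

-- ===== PORT A =====
-- module-level tag sets used by A
def pvGenderTags : List String := ["m1", "m2", "m3", "f", "n"]
def pvNumberTags : List String := ["pl", "sg"]
def pvCaseTags : List String := ["nom", "gen", "dat", "acc", "inst", "loc", "voc"]

def extract_gnc (interpretation : List String) : String :=
  let gender := interpretation.find? (fun token => pvGenderTags.contains token)
  let number := interpretation.find? (fun token => pvNumberTags.contains token)
  let case_ := interpretation.find? (fun token => pvCaseTags.contains token)
  let pos := (PySem.List.pyGet? interpretation 1).getD ""  -- IndexError when length < 2: excluded by Pre_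
  let gnc := PySem.Str.join "" ([gender, number, case_].filterMap id)
  if gnc ≠ "" then PySem.Str.join "" [pos, ":", gnc] else pos

-- ===== PORT B =====
-- B's module-level dict mapping every tag to its category index
def pvTag2Cat : PySem.Dict String Int := PySem.Dict.mk
  [("m1", 0), ("m2", 0), ("m3", 0), ("f", 0), ("n", 0),
   ("pl", 1), ("sg", 1),
   ("nom", 2), ("gen", 2), ("dat", 2), ("acc", 2), ("inst", 2), ("loc", 2), ("voc", 2)]

-- B's loop body: one dict lookup, unconditional overwrite of the found category slot
def pvStepB (acc : Option String × Option String × Option String) (token : String) :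
    Option String × Option String × Option String :=
  match PySem.Dict.get? pvTag2Cat token with
  | some 0 => (some token, acc.2.1, acc.2.2)
  | some 1 => (acc.1, some token, acc.2.2)
  | some 2 => (acc.1, acc.2.1, some token)
  | _ => acc

def extract_gnc_alt (interpretation : List String) : String :=
  let slots := interpretation.reverse.foldl pvStepB (none, none, none)
  let pos := (PySem.List.pyGet? interpretation 1).getD ""  -- IndexError when length < 2: excluded by Pre_
  let gnc := PySem.Str.join "" ([slots.1, slots.2.1, slots.2.2].filterMap id)
  if gnc ≠ "" then PySem.Str.join "" [pos, ":", gnc] else pos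

-- ===== PRECONDITION & SPEC =====
-- Pre_ excludes only lists with fewer than 2 elements, on which A (and B) raise IndexError at interpretation[1].
def Pre_extract_gnc (interpretation : List String) : Prop := 2 ≤ interpretation.length
instance (interpretation : List String) : Decidable (Pre_extract_gnc interpretation) := by unfold Pre_extract_gnc; infer_instance
def pvWitness_extract_gnc : List String := ["kot", "subst", "sg", "nom", "m2"]

def Spec_extract_gnc (interpretation : List String) (out : String) : Prop := out = extract_gnc_alt interpretation
instance (interpretation : List String) (out : String) : Decidable (Spec_extract_gnc interpretation out) := by unfold Spec_extract_gnc; infer_instance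

-- ===== CLAIM (what is proved, stated in full; the proofs are below) =====
def Claim_equal_extract_gnc : Prop := ∀ (interpretation : List String), Dom_extract_gnc interpretation → Pre_extract_gnc interpretation → Spec_extract_gnc interpretation (extract_gnc interpretation)

-- ===== LEMMAS AND PROOFS =====

-- the dict lookup agrees with the three set-membership tests
lemma pvCatOf_eq (t : String) :
    PySem.Dict.get? pvTag2Cat t =
      if pvGenderTags.contains t then some 0
      else if pvNumberTags.contains t then some 1
      else if pvCaseTags.contains t then some 2
      else none := by
  by_cases h1 : t = "m1"
  · subst h1; decide
  by_cases h2 : t = "m2"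
  · subst h2; decide
  by_cases h3 : t = "m3"
  · subst h3; decide
  by_cases h4 : t = "f"
  · subst h4; decide
  by_cases h5 : t = "n"
  · subst h5; decide
  by_cases h6 : t = "pl"
  · subst h6; decide
  by_cases h7 : t = "sg"
  · subst h7; decide
  by_cases h8 : t = "nom"
  · subst h8; decide
  by_cases h9 : t = "gen"
  · subst h9; decide
  by_cases h10 : t = "dat"
  · subst h10; decide
  by_cases h11 : t = "acc"
  · subst h11; decide
  by_cases h12 : t = "inst"
  · subst h12; decide
  by_cases h13 : t = "loc"
  · subst h13; decide
  by_cases h14 : t = "voc"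
  · subst h14; decide
  simp [pvTag2Cat, PySem.Dict.get?, pvGenderTags, pvNumberTags,
    pvCaseTags, Ne.symm h1, Ne.symm h2, Ne.symm h3, Ne.symm h4, Ne.symm h5, Ne.symm h6, Ne.symm h7, Ne.symm h8, Ne.symm h9, Ne.symm h10, Ne.symm h11, Ne.symm h12, Ne.symm h13, Ne.symm h14, h1, h2, h3, h4, h5, h6, h7, h8, h9, h10, h11, h12, h13, h14]

-- the backwards overwriting walk computes exactly the three first forward matches
lemma foldl_reverse_pvStepB (l : List String) :
    l.reverse.foldl pvStepB (none, none, none) =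
      (l.find? (fun t => pvGenderTags.contains t),
       l.find? (fun t => pvNumberTags.contains t),
       l.find? (fun t => pvCaseTags.contains t)) := by
  rw [List.foldl_reverse]
  induction l with
  | nil => simp
  | cons t l ih =>
    rw [List.foldr_cons, ih]
    unfold pvStepB
    rw [pvCatOf_eq]
    by_cases h1 : t ∈ pvGenderTags
    · have h2 : t ∉ pvNumberTags := by fin_cases h1 <;> decide
      have h3 : t ∉ pvCaseTags := by fin_cases h1 <;> decide
      simp [h1, h2, h3]
    · by_cases h2 : t ∈ pvNumberTags
      · have h3 : t ∉ pvCaseTags := by fin_cases h2 <;> decide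
        simp [h1, h2, h3]
      · by_cases h3 : t ∈ pvCaseTags
        · simp [h1, h2, h3]
        · simp [h1, h2, h3]

-- ===== VERDICT (by name: the statement is the Claim_ definition above) =====
theorem extract_gnc_spec : Claim_equal_extract_gnc := by
  intro interpretation _ _
  unfold Spec_extract_gnc extract_gnc extract_gnc_alt
  rw [foldl_reverse_pvStepB]
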